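-- pv_equiv track=rewrite | github.com/Mannosantino/ProyectoProgramacion1 | Funciones.py | categorizar
-- ===== SOURCE A (Python) =====
-- def categorizar(lista_productos):
--     lacteos = []
--     bebidas = []
--     dulces = []
--     alimentos = []
--     frutas_verduras = []
--
--     for producto in lista_productos:
--         if producto in ["Leche","Queso","Yogurt","Mantequilla"] and producto not in lacteos:
--             lacteos.append(producto)
--         elif producto in ["Harina","Arroz","Pasta","Aceite de oliva","Huevo","Pan","Sal","Pimienta","Carne de res","Pollo","Pescado","Tomate","Cebolla","Papa","Zanahoria","Carne Congelada","Azucar","Miel","Mermelada","Papas fritas","Nueces","Almendras"] and producto not in alimentos: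
--             alimentos.append(producto)
--         elif producto in ["Manzana","Banana","Naranja","Uva"] and producto not in frutas_verduras:
--             frutas_verduras.append(producto)
--         elif producto in ["Refresco","Agua","Cerveza","Café","Té","Jugo de naranja","Soda"] and producto not in bebidas:
--             bebidas.append(producto)
--         elif producto in ["Chocolates","Galletas","Turrones","Caramelos","Helado","Pastel","Torta","Donas","Bombones","Chicles","Pastillas","Gomitas","Chupetines","Regalices"]and producto not in dulces:
--             dulces.append(producto)
--
--     return lacteos, bebidas, dulces, alimentos, frutas_verduras
-- ===== SOURCE B (Python) =====
-- _LACTEOS = frozenset(["Leche", "Queso", "Yogurt", "Mantequilla"])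
-- _BEBIDAS = frozenset(["Refresco", "Agua", "Cerveza", "Caf\u00e9", "T\u00e9", "Jugo de naranja", "Soda"])
-- _DULCES = frozenset(["Chocolates", "Galletas", "Turrones", "Caramelos", "Helado", "Pastel", "Torta",
--                      "Donas", "Bombones", "Chicles", "Pastillas", "Gomitas", "Chupetines", "Regalices"])
-- _ALIMENTOS = frozenset(["Harina", "Arroz", "Pasta", "Aceite de oliva", "Huevo", "Pan", "Sal", "Pimienta",
--                         "Carne de res", "Pollo", "Pescado", "Tomate", "Cebolla", "Papa", "Zanahoria",
--                         "Carne Congelada", "Azucar", "Miel", "Mermelada", "Papas fritas", "Nueces", "Almendras"])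
-- _FRUTAS_VERDURAS = frozenset(["Manzana", "Banana", "Naranja", "Uva"])
--
--
-- def categorizar(lista_productos):
--     # Stage 1: deduplicate the whole input, keeping first occurrences in order.
--     deduped = list(dict.fromkeys(lista_productos))
--     # Stage 2: each category is a filter over the deduped list; the vocabularies
--     # are pairwise disjoint and unknown products match no filter, so this equals
--     # A's per-category first-occurrence lists.
--     lacteos = [p for p in deduped if p in _LACTEOS]
--     bebidas = [p for p in deduped if p in _BEBIDAS]
--     dulces = [p for p in deduped if p in _DULCES]
--     alimentos = [p for p in deduped if p in _ALIMENTOS]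
--     frutas_verduras = [p for p in deduped if p in _FRUTAS_VERDURAS]
--     return lacteos, bebidas, dulces, alimentos, frutas_verduras
-- ===== Notes on version B (the rewrite author's own statement) =====
-- stated objective: faster
-- what changed: Replaces A's single pass that dispatches into five accumulators with if/elif membership chains and per-category dedup scans by staged passes: one global hash-based dedup of the input (dict.fromkeys) followed by five independent membership filters (frozenset tests) over the much shorter deduped list.
import Mathlib
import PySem

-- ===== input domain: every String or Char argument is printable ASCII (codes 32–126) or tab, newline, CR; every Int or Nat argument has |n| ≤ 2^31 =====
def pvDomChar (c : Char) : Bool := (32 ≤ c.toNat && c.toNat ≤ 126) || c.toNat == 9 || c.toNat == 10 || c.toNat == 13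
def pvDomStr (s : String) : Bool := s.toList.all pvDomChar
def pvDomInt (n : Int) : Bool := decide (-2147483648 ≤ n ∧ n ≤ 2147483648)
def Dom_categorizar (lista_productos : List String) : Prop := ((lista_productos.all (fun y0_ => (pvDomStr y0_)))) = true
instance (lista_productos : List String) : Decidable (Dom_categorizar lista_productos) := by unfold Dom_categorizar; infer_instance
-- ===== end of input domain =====

-- B replaces A's single dispatching pass with five accumulators by staged passes:
-- one global dedup of the input, then five independent membership filters; objective: simpler.

-- ===== PORT A =====
-- the five accumulator lists as a tuple (lacteos, bebidas, dulces, alimentos, frutas_verduras)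
def categorizarStep (st : List String × List String × List String × List String × List String)
    (p : String) : List String × List String × List String × List String × List String :=
  let (lac, beb, dul, ali, fru) := st
  if p ∈ ["Leche","Queso","Yogurt","Mantequilla"] ∧ p ∉ lac then
    (lac ++ [p], beb, dul, ali, fru)
  else if p ∈ ["Harina","Arroz","Pasta","Aceite de oliva","Huevo","Pan","Sal","Pimienta","Carne de res","Pollo","Pescado","Tomate","Cebolla","Papa","Zanahoria","Carne Congelada","Azucar","Miel","Mermelada","Papas fritas","Nueces","Almendras"] ∧ p ∉ ali then
    (lac, beb, dul, ali ++ [p], fru)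
  else if p ∈ ["Manzana","Banana","Naranja","Uva"] ∧ p ∉ fru then
    (lac, beb, dul, ali, fru ++ [p])
  else if p ∈ ["Refresco","Agua","Cerveza","Café","Té","Jugo de naranja","Soda"] ∧ p ∉ beb then
    (lac, beb ++ [p], dul, ali, fru)
  else if p ∈ ["Chocolates","Galletas","Turrones","Caramelos","Helado","Pastel","Torta","Donas","Bombones","Chicles","Pastillas","Gomitas","Chupetines","Regalices"] ∧ p ∉ dul then
    (lac, beb, dul ++ [p], ali, fru)
  else
    (lac, beb, dul, ali, fru)

def categorizar (lista_productos : List String) : List String × List String × List String × List String × List String :=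
  lista_productos.foldl categorizarStep ([], [], [], [], [])

-- ===== PORT B =====
def vocabLacteos : List String := ["Leche","Queso","Yogurt","Mantequilla"]
def vocabBebidas : List String := ["Refresco","Agua","Cerveza","Café","Té","Jugo de naranja","Soda"]
def vocabDulces : List String := ["Chocolates","Galletas","Turrones","Caramelos","Helado","Pastel","Torta","Donas","Bombones","Chicles","Pastillas","Gomitas","Chupetines","Regalices"]
def vocabAlimentos : List String := ["Harina","Arroz","Pasta","Aceite de oliva","Huevo","Pan","Sal","Pimienta","Carne de res","Pollo","Pescado","Tomate","Cebolla","Papa","Zanahoria","Carne Congelada","Azucar","Miel","Mermelada","Papas fritas","Nueces","Almendras"]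
def vocabFrutas : List String := ["Manzana","Banana","Naranja","Uva"]

-- stage 1: list(dict.fromkeys(xs)) — keep first occurrences in order
def pyDedup (xs : List String) : List String :=
  xs.foldl (fun acc p => if p ∈ acc then acc else acc ++ [p]) []

-- stage 2: five membership filters over the deduped list
def categorizar_alt (lista_productos : List String) : List String × List String × List String × List String × List String :=
  let d := pyDedup lista_productos
  (d.filter (fun p => p ∈ vocabLacteos),
   d.filter (fun p => p ∈ vocabBebidas),
   d.filter (fun p => p ∈ vocabDulces),
   d.filter (fun p => p ∈ vocabAlimentos),
   d.filter (fun p => p ∈ vocabFrutas))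

-- ===== PRECONDITION & SPEC =====
def Spec_categorizar (lista_productos : List String) (out : List String × List String × List String × List String × List String) : Prop := out = categorizar_alt lista_productos
instance (lista_productos : List String) (out : List String × List String × List String × List String × List String) : Decidable (Spec_categorizar lista_productos out) := by unfold Spec_categorizar; infer_instance

-- ===== CLAIM (what is proved, stated in full; the proofs are below) =====
def Claim_equal_categorizar : Prop := ∀ (lista_productos : List String), Dom_categorizar lista_productos → Spec_categorizar lista_productos (categorizar lista_productos)

-- ===== LEMMAS AND PROOFS =====

-- the state of A's fold, reconstructed from the set of already-seen products
def stateOf (seen : List String) : List String × List String × List String × List String × List String :=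
  (seen.filter (fun p => p ∈ vocabLacteos),
   seen.filter (fun p => p ∈ vocabBebidas),
   seen.filter (fun p => p ∈ vocabDulces),
   seen.filter (fun p => p ∈ vocabAlimentos),
   seen.filter (fun p => p ∈ vocabFrutas))

lemma disjLB : ∀ p ∈ vocabLacteos, p ∉ vocabBebidas := by decide
lemma disjLD : ∀ p ∈ vocabLacteos, p ∉ vocabDulces := by decide
lemma disjLA : ∀ p ∈ vocabLacteos, p ∉ vocabAlimentos := by decide
lemma disjLF : ∀ p ∈ vocabLacteos, p ∉ vocabFrutas := by decide
lemma disjBD : ∀ p ∈ vocabBebidas, p ∉ vocabDulces := by decide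
lemma disjBA : ∀ p ∈ vocabBebidas, p ∉ vocabAlimentos := by decide
lemma disjBF : ∀ p ∈ vocabBebidas, p ∉ vocabFrutas := by decide
lemma disjDA : ∀ p ∈ vocabDulces, p ∉ vocabAlimentos := by decide
lemma disjDF : ∀ p ∈ vocabDulces, p ∉ vocabFrutas := by decide
lemma disjAF : ∀ p ∈ vocabAlimentos, p ∉ vocabFrutas := by decide

-- one step of A's fold equals one step of the dedup fold, viewed through stateOf
lemma step_state (seen : List String) (p : String) :
    categorizarStep (stateOf seen) p = stateOf (if p ∈ seen then seen else seen ++ [p]) := by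
  unfold categorizarStep stateOf
  simp only [show (["Leche","Queso","Yogurt","Mantequilla"] : List String) = vocabLacteos from rfl,
    show (["Refresco","Agua","Cerveza","Café","Té","Jugo de naranja","Soda"] : List String) = vocabBebidas from rfl,
    show (["Chocolates","Galletas","Turrones","Caramelos","Helado","Pastel","Torta","Donas","Bombones","Chicles","Pastillas","Gomitas","Chupetines","Regalices"] : List String) = vocabDulces from rfl,
    show (["Harina","Arroz","Pasta","Aceite de oliva","Huevo","Pan","Sal","Pimienta","Carne de res","Pollo","Pescado","Tomate","Cebolla","Papa","Zanahoria","Carne Congelada","Azucar","Miel","Mermelada","Papas fritas","Nueces","Almendras"] : List String) = vocabAlimentos from rfl,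
    show (["Manzana","Banana","Naranja","Uva"] : List String) = vocabFrutas from rfl]
  by_cases hs : p ∈ seen
  · -- already seen: p is in its category's filter (if any), so every branch is a no-op
    by_cases h0 : p ∈ vocabLacteos
    · simp [hs, h0, disjLA _ h0, disjLF _ h0, disjLB _ h0, disjLD _ h0, List.mem_filter]
    · by_cases h1 : p ∈ vocabAlimentos
      · simp [hs, h0, h1, disjAF _ h1, List.mem_filter]
      · by_cases h2 : p ∈ vocabFrutas
        · simp [hs, h0, h1, h2, List.mem_filter]
        · by_cases h3 : p ∈ vocabBebidas
          · simp [hs, h0, h1, h2, h3, disjBD _ h3, List.mem_filter]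
          · by_cases h4 : p ∈ vocabDulces
            · simp [hs, h0, h1, h2, h3, h4, List.mem_filter]
            · simp [hs, h0, h1, h2, h3, h4, List.mem_filter]
  · -- fresh product: exactly its category's filter grows by [p]
    by_cases h0 : p ∈ vocabLacteos
    · simp [hs, h0, disjLA _ h0, disjLF _ h0, disjLB _ h0, disjLD _ h0,
        List.mem_filter, List.filter_append]
    · by_cases h1 : p ∈ vocabAlimentos
      · simp [hs, h0, h1, disjAF _ h1, List.mem_filter, List.filter_append]
        exact ⟨fun h => disjBA p h h1, fun h => disjDA p h h1⟩
      · by_cases h2 : p ∈ vocabFrutas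
        · simp [hs, h0, h1, h2, List.mem_filter, List.filter_append]
          exact ⟨fun h => disjBF p h h2, fun h => disjDF p h h2⟩
        · by_cases h3 : p ∈ vocabBebidas
          · simp [hs, h0, h1, h2, h3, disjBD _ h3, List.mem_filter, List.filter_append]
          · by_cases h4 : p ∈ vocabDulces
            · simp [hs, h0, h1, h2, h3, h4, List.mem_filter, List.filter_append]
            · simp [hs, h0, h1, h2, h3, h4, List.mem_filter, List.filter_append]

lemma fold_state (l : List String) : ∀ (seen : List String),
    l.foldl categorizarStep (stateOf seen)
      = stateOf (l.foldl (fun acc p => if p ∈ acc then acc else acc ++ [p]) seen) := by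
  induction l with
  | nil => intro seen; rfl
  | cons x tl ih => intro seen; simp only [List.foldl_cons, step_state, ih]

-- ===== VERDICT (by name: the statement is the Claim_ definition above) =====
theorem categorizar_spec : Claim_equal_categorizar := by
  intro l _
  show categorizar l = categorizar_alt l
  have h : stateOf ([] : List String) = ([], [], [], [], []) := rfl
  unfold categorizar categorizar_alt pyDedup
  rw [← h, fold_state]
  rfl
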